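-- pv_equiv track=rewrite | github.com/ElenaBadilloG/Haze | Haze/phonetic_fuzzer.py | metaphone_simple
-- ===== SOURCE A (Python) =====
-- def metaphone_simple(word: str) -> str:
--     """Simplified Metaphone algorithm."""
--     if not word:
--         return ""
--
--     word = word.upper().replace("PH", "F").replace("GH", "F")
--     word = word.replace("CK", "K").replace("SCH", "SK")
--
--     metaphone = ""
--     prev_char = ""
--
--     for char in word:
--         if char in "AEIOU":
--             if not metaphone:
--                 metaphone += char
--         elif char != prev_char:
--             metaphone += char
--         prev_char = char
--
--     return metaphone[:6]
-- ===== SOURCE B (Python) =====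
-- def metaphone_simple(word: str) -> str:
--     """Simplified Metaphone: run-collapse pass, then vowel filter, then truncate."""
--     if not word:
--         return ""
--     word = word.upper().replace("PH", "F").replace("GH", "F")
--     word = word.replace("CK", "K").replace("SCH", "SK")
--     # pass 1: collapse runs of equal adjacent characters
--     dedup = word[0] + "".join(c for c, p in zip(word[1:], word) if c != p)
--     # pass 2: keep the leading character, drop vowels from the rest; truncate to 6
--     return (dedup[0] + "".join(c for c in dedup[1:] if c not in "AEIOU"))[:6]
-- ===== Notes on version B (the rewrite author's own statement) =====
-- stated objective: simpler
-- what changed: Replaced A's single accumulator loop carrying prev_char and metaphone state by two separate stateless passes: a zip-based collapse of adjacent duplicate runs, then a vowel filter that keeps the leading character, with one final truncation.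
import Mathlib
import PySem

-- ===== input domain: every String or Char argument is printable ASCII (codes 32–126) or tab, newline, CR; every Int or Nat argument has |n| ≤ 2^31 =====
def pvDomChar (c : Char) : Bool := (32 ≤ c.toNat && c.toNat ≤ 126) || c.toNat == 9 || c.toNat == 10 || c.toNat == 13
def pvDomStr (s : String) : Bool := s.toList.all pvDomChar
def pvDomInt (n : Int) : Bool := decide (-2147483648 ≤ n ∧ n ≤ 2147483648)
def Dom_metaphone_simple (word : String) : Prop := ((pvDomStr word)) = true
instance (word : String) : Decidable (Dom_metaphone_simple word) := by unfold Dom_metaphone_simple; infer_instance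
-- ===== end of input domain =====

-- B replaces A's single accumulator loop (prev_char state) by two separate passes:
-- collapse adjacent-duplicate runs, then filter vowels keeping the leading character (objective: simpler).

-- ===== PORT A =====
-- the preprocessing shared by both Pythons (upper + the four replaces), transliterated once
def pvPrep (word : String) : String :=
  PySem.Str.replace (PySem.Str.replace
    (PySem.Str.replace (PySem.Str.replace (PySem.Str.upper word) "PH" "F") "GH" "F")
    "CK" "K") "SCH" "SK"

-- A's for-loop over the characters, state = (metaphone, prev_char); prev_char "" is `none`
def pvLoopA (m : List Char) (prev : Option Char) : List Char → List Char
  | [] => m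
  | c :: r =>
    if c ∈ "AEIOU".toList then
      if m = [] then pvLoopA (m ++ [c]) (some c) r else pvLoopA m (some c) r
    else if some c ≠ prev then pvLoopA (m ++ [c]) (some c) r
    else pvLoopA m (some c) r

def metaphone_simple (word : String) : String :=
  if word = "" then "" else
  String.ofList ((pvLoopA [] none (pvPrep word).toList).take 6)   -- metaphone[:6]

-- ===== PORT B =====
-- pass 1 of Source B: run-collapse ("".join of c for c,p in zip(word[1:], word) if c != p)
def pvCollapse (p : Char) : List Char → List Char
  | [] => []
  | c :: r => if c = p then pvCollapse p r else c :: pvCollapse c r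

def metaphone_simple_alt (word : String) : String :=
  if word = "" then "" else
  let d := match (pvPrep word).toList with
           | [] => []
           | c :: r => c :: pvCollapse c r
  match d with
  | [] => ""
  | c :: r => String.ofList ((c :: r.filter (fun x => x ∉ "AEIOU".toList)).take 6)

-- ===== PRECONDITION & SPEC =====
def Spec_metaphone_simple (word : String) (out : String) : Prop := out = metaphone_simple_alt word
instance (word : String) (out : String) : Decidable (Spec_metaphone_simple word out) := by unfold Spec_metaphone_simple; infer_instance

-- ===== CLAIM (what is proved, stated in full; the proofs are below) =====
def Claim_equal_metaphone_simple : Prop := ∀ (word : String), Dom_metaphone_simple word → Spec_metaphone_simple word (metaphone_simple word)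

-- ===== LEMMAS AND PROOFS =====

-- loop invariant: once metaphone is nonempty, A's loop appends exactly the
-- non-vowels of the run-collapsed remainder
lemma pvLoopA_eq_collapse (rest : List Char) :
    ∀ (m : List Char) (p : Char), m ≠ [] →
      pvLoopA m (some p) rest = m ++ (pvCollapse p rest).filter (fun x => x ∉ "AEIOU".toList) := by
  induction rest with
  | nil => intro m p _; simp [pvLoopA, pvCollapse]
  | cons c r ih =>
    intro m p hm
    by_cases hv : c = 'A' ∨ c = 'E' ∨ c = 'I' ∨ c = 'O' ∨ c = 'U'
    · by_cases hcp : c = p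
      · subst hcp
        simp [pvLoopA, pvCollapse, hv, hm, ih m c hm]
      · simp [pvLoopA, pvCollapse, hv, hm, hcp, ih m c hm]
        rcases hv with h|h|h|h|h <;> simp [h]
    · push Not at hv
      by_cases hcp : c = p
      · subst hcp
        simp [pvLoopA, pvCollapse, hv, ih m c hm]
      · have h1 : pvLoopA m (some p) (c :: r) = pvLoopA (m ++ [c]) (some c) r := by
          simp [pvLoopA, hv, hcp]
        rw [h1, ih (m ++ [c]) c (by simp)]
        simp [pvCollapse, hcp, hv]

lemma pvLoopA_start (c : Char) (r : List Char) :
    pvLoopA [] none (c :: r) = c :: (pvCollapse c r).filter (fun x => x ∉ "AEIOU".toList) := by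
  by_cases hv : c = 'A' ∨ c = 'E' ∨ c = 'I' ∨ c = 'O' ∨ c = 'U'
  · simp [pvLoopA, hv, pvLoopA_eq_collapse r [c] c (by simp)]
  · simp [pvLoopA, hv, pvLoopA_eq_collapse r [c] c (by simp)]

-- ===== VERDICT (by name: the statement is the Claim_ definition above) =====
theorem metaphone_simple_spec : Claim_equal_metaphone_simple := by
  intro word _
  unfold Spec_metaphone_simple metaphone_simple metaphone_simple_alt
  by_cases h : word = ""
  · simp [h]
  · simp only [h, if_false]
    cases hw : (pvPrep word).toList with
    | nil => simp [pvLoopA]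
    | cons c r => simp [pvLoopA_start]
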